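-- pv_equiv track=rewrite | github.com/alekssp3/kip | kip/utils/excel/Excel.py | numerator3
-- ===== SOURCE A (Python) =====
-- def numerator3(arr):
--     'String numerator by page count and index'
--     out = []
--     page_sum = 0
--     prev_data = ''
--     for data in arr:
--         page_count = abs(int(data[0]))
--         cur_data = data[1]
--         if cur_data != prev_data:
--             page_sum = 0
--         if page_count == 0:
--             page_count = 1
--         if page_count == 1:
--             out.append(str(page_sum + 1))
--         else:
--             out.append(str(page_sum + 1) + ' - ' + str(page_count + page_sum))
--         page_sum = page_count + page_sum
--         prev_data = cur_data
--     return out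
-- ===== SOURCE B (Python) =====
-- def numerator3(arr):
--     'String numerator by page count and index'
--     counts = [abs(int(d[0])) or 1 for d in arr]
--     prefix = [0]
--     for c in counts:
--         prefix.append(prefix[-1] + c)
--     base, prev, b = [], None, 0
--     for d, p in zip(arr, prefix):
--         if d[1] != prev:
--             b = p
--         base.append(b)
--         prev = d[1]
--     out = []
--     for c, p, b in zip(counts, prefix, base):
--         s = p - b
--         out.append(str(s + 1) if c == 1 else str(s + 1) + ' - ' + str(c + s))
--     return out
-- ===== Notes on version B (the rewrite author's own statement) =====
-- stated objective: alternative
-- what changed: Replaces A's single stateful loop with a resetting page_sum accumulator by staged passes over parallel lists: a global cumulative prefix-sum of adjusted page counts, a pass recording the cumulative value at each element's run start, and a final zip deriving each range string by subtracting the run base from the global prefix.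
import Mathlib
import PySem

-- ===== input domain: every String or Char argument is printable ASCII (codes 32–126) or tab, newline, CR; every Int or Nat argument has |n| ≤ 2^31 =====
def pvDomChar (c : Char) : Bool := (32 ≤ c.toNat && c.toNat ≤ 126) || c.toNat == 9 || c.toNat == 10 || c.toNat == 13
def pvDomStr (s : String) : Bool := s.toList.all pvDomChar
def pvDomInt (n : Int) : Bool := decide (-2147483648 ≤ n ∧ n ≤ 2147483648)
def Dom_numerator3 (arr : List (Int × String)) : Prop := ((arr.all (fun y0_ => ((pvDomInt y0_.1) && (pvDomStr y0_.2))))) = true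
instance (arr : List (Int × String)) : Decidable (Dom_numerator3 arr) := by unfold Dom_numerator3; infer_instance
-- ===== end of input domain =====

-- B replaces A's single stateful loop (page_sum resetting on key change) with staged passes
-- over parallel lists: global prefix sums of adjusted counts, the cumulative value at each
-- element's run start, and a final zip deriving each entry by subtraction (alternative).

-- ===== PORT A =====
-- literal port of A's single loop over (out, page_sum, prev_data)
def numerator3 (arr : List (Int × String)) : List String :=
  (arr.foldl (fun (st : List String × Int × String) data =>
    let page_count := |data.1|
    let cur_data := data.2
    let page_sum := if cur_data ≠ st.2.2 then 0 else st.2.1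
    let page_count := if page_count = 0 then 1 else page_count
    let out :=
      if page_count = 1 then st.1 ++ [PySem.Int.toStr (page_sum + 1)]
      else st.1 ++ [PySem.Int.toStr (page_sum + 1) ++ " - " ++ PySem.Int.toStr (page_count + page_sum)]
    (out, page_count + page_sum, cur_data)) ([], 0, "")).1

-- ===== PORT B =====
-- Source B's staged passes: counts (comprehension), prefix (append loop = scanl),
-- base (loop over zip(arr, prefix) with (prev, b) state), final zip-map.
def numerator3_alt (arr : List (Int × String)) : List String :=
  let counts := arr.map (fun d => if |d.1| = 0 then 1 else |d.1|)
  let prefixL := counts.scanl (· + ·) 0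
  let base := ((arr.zip prefixL).foldl (fun (st : List Int × Option String × Int) dp =>
      let b := if some dp.1.2 ≠ st.2.1 then dp.2 else st.2.2
      (st.1 ++ [b], some dp.1.2, b)) ([], none, 0)).1
  (counts.zip (prefixL.zip base)).map (fun x =>
    let s := x.2.1 - x.2.2
    if x.1 = 1 then PySem.Int.toStr (s + 1)
    else PySem.Int.toStr (s + 1) ++ " - " ++ PySem.Int.toStr (x.1 + s))

-- ===== PRECONDITION & SPEC =====
def Spec_numerator3 (arr : List (Int × String)) (out : List String) : Prop := out = numerator3_alt arr
instance (arr : List (Int × String)) (out : List String) : Decidable (Spec_numerator3 arr out) := by unfold Spec_numerator3; infer_instance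

-- ===== CLAIM (what is proved, stated in full; the proofs are below) =====
def Claim_equal_numerator3 : Prop := ∀ (arr : List (Int × String)), Dom_numerator3 arr → Spec_numerator3 arr (numerator3 arr)

-- ===== LEMMAS AND PROOFS =====

def cAdj (d : Int × String) : Int := if |d.1| = 0 then 1 else |d.1|

def render (c s : Int) : String :=
  if c = 1 then PySem.Int.toStr (s + 1)
  else PySem.Int.toStr (s + 1) ++ " - " ++ PySem.Int.toStr (c + s)

-- A's loop rewritten as structural recursion building the list front-to-back
def recA : List (Int × String) → Int → String → List String
  | [], _, _ => []
  | d :: rest, sum, prev =>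
    let s := if d.2 ≠ prev then 0 else sum
    render (cAdj d) s :: recA rest (cAdj d + s) d.2

theorem foldA_eq_recA (arr : List (Int × String)) :
    ∀ (acc : List String) (sum : Int) (prev : String),
    (arr.foldl (fun (st : List String × Int × String) data =>
      let page_count := |data.1|
      let cur_data := data.2
      let page_sum := if cur_data ≠ st.2.2 then 0 else st.2.1
      let page_count := if page_count = 0 then 1 else page_count
      let out :=
        if page_count = 1 then st.1 ++ [PySem.Int.toStr (page_sum + 1)]
        else st.1 ++ [PySem.Int.toStr (page_sum + 1) ++ " - " ++ PySem.Int.toStr (page_count + page_sum)]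
      (out, page_count + page_sum, cur_data)) (acc, sum, prev)).1
      = acc ++ recA arr sum prev := by
  induction arr with
  | nil => intro acc sum prev; simp [recA]
  | cons d rest ih =>
    intro acc sum prev
    simp only [List.foldl_cons, recA, render, cAdj]
    rw [ih]
    split_ifs <;> simp

-- B's base-pass loop as structural recursion
def mkBase : List ((Int × String) × Int) → Option String → Int → List Int
  | [], _, _ => []
  | dp :: t, prev, b0 =>
    let b := if some dp.1.2 ≠ prev then dp.2 else b0
    b :: mkBase t (some dp.1.2) b

theorem fold_base (l : List ((Int × String) × Int)) :
    ∀ (acc : List Int) (prev : Option String) (b0 : Int),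
    (l.foldl (fun (st : List Int × Option String × Int) dp =>
      let b := if some dp.1.2 ≠ st.2.1 then dp.2 else st.2.2
      (st.1 ++ [b], some dp.1.2, b)) (acc, prev, b0)).1 = acc ++ mkBase l prev b0 := by
  induction l with
  | nil => intro acc prev b0; simp [mkBase]
  | cons dp t ih =>
    intro acc prev b0
    simp only [List.foldl_cons, mkBase]
    rw [ih]
    split_ifs <;> simp

-- B's three passes fused into one recursion carrying (prefix value p, run base b, prev key)
def recB : List (Int × String) → Int → Int → Option String → List String
  | [], _, _, _ => []
  | d :: t, p, b, prev =>
    let b' := if some d.2 ≠ prev then p else b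
    render (cAdj d) (p - b') :: recB t (p + cAdj d) b' (some d.2)

theorem B_fuse (arr : List (Int × String)) :
    ∀ (p b : Int) (prev : Option String),
    ((arr.map (fun d => if |d.1| = 0 then 1 else |d.1|)).zip
        (((arr.map (fun d => if |d.1| = 0 then 1 else |d.1|)).scanl (· + ·) p).zip
          (mkBase (arr.zip ((arr.map (fun d => if |d.1| = 0 then 1 else |d.1|)).scanl (· + ·) p)) prev b))).map
      (fun x =>
        if x.1 = 1 then PySem.Int.toStr (x.2.1 - x.2.2 + 1)
        else PySem.Int.toStr (x.2.1 - x.2.2 + 1) ++ " - " ++ PySem.Int.toStr (x.1 + (x.2.1 - x.2.2)))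
      = recB arr p b prev := by
  induction arr with
  | nil => intro p b prev; simp [recB]
  | cons d t ih =>
    intro p b prev
    simp only [List.map_cons, List.scanl_cons, List.zip_cons_cons, mkBase, recB]
    rw [ih]
    rfl

theorem recB_eq_recA (arr : List (Int × String)) :
    ∀ (p b : Int) (prevA : String) (prev : Option String),
    (prev = some prevA ∨ (prev = none ∧ p = b)) →
    recB arr p b prev = recA arr (p - b) prevA := by
  induction arr with
  | nil => intros; simp [recB, recA]
  | cons d t ih =>
    intro p b prevA prev h
    rcases h with h | ⟨h, hpb⟩
    · subst h
      by_cases hk : d.2 = prevA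
      · simp only [recB, recA, hk, ne_eq, not_true_eq_false, if_false]
        rw [ih (p + cAdj d) b prevA (some prevA) (Or.inl rfl)]
        refine congrArg₂ _ rfl ?_
        congr 1; ring
      · have hne : some d.2 ≠ some prevA := by simpa using hk
        simp only [recB, recA, hk, ne_eq, not_false_eq_true, if_true, hne, sub_self]
        rw [ih (p + cAdj d) p d.2 (some d.2) (Or.inl rfl)]
        refine congrArg₂ _ rfl ?_
        congr 1; ring
    · subst h; subst hpb
      have hne : some d.2 ≠ (none : Option String) := by simp
      simp only [recB, recA, hne, ne_eq, not_false_eq_true, if_true, sub_self]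
      simp only [ite_self]
      rw [ih (p + cAdj d) p d.2 (some d.2) (Or.inl rfl)]
      refine congrArg₂ _ rfl ?_
      congr 1; ring

-- ===== VERDICT (by name: the statement is the Claim_ definition above) =====
theorem numerator3_spec : Claim_equal_numerator3 := by
  intro arr _
  unfold Spec_numerator3
  simp only [numerator3, numerator3_alt]
  rw [foldA_eq_recA]
  simp only [List.nil_append]
  rw [fold_base]
  simp only [List.nil_append]
  rw [B_fuse arr 0 0 none]
  rw [recB_eq_recA arr 0 0 "" none (Or.inr ⟨rfl, rfl⟩)]
  simp
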